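-- pv_equiv track=rewrite | github.com/tilde-nlp/PIP3_1.3_MultiLingualASR | extract_alignments.py | single_occurance_check
-- ===== SOURCE A (Python) =====
-- def single_occurance_check(alignment):
--     # split alignment into source and target indexes
--     alignment = alignment.split()
--     source = []
--     target = []
--     for al in alignment:
--         al = al.split("-")
--         # sanity check
--         assert (len(al) == 2)
--         source.append(al[0])
--         target.append(al[1])
--
--     # discard if there are any repeated indexes in source
--     if len(source) != len(set(source)):
--         return False
--
--     # discard if there are any repeated indexes in target
--     if len(target) != len(set(target)):
--         return False
--
--     return True
-- ===== SOURCE B (Python) =====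
-- def single_occurance_check(alignment):
--     # same parsing: split tokens and split each on '-' (assert len 2),
--     # but detect duplicates by sorting and scanning adjacent neighbours
--     pairs = [al.split("-") for al in alignment.split()]
--     for p in pairs:
--         assert len(p) == 2
--     source = sorted(p[0] for p in pairs)
--     if any(a == b for a, b in zip(source, source[1:])):
--         return False
--     target = sorted(p[1] for p in pairs)
--     return not any(a == b for a, b in zip(target, target[1:]))
-- ===== Notes on version B (the rewrite author's own statement) =====
-- stated objective: alternative
-- what changed: Duplicate detection switched from hashing (len(set(...)) comparison) to sorting each index list and scanning adjacent neighbours, and the parsing is restructured as comprehensions over a pairs list instead of a loop appending to two accumulators.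
import Mathlib
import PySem

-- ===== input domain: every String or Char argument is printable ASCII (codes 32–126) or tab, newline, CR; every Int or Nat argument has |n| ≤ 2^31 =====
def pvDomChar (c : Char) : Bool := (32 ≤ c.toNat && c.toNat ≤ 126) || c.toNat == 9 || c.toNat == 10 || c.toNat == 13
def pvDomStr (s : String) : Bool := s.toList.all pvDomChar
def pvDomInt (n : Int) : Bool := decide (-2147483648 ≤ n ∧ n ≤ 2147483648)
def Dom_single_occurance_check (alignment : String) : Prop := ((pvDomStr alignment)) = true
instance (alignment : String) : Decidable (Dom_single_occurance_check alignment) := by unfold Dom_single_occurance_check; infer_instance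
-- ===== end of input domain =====

-- B keeps A's parsing (restructured as maps) but detects duplicate indexes by sorting and
-- scanning adjacent neighbours instead of comparing lengths with a deduplicated set.

-- ===== PORT A =====
-- al.split("-") with the literal non-empty separator "-": split? is always `some` here
def pvSplitDash (al : String) : List String := (PySem.Str.split? al "-").getD []

-- the for-loop of A: Option state, none = AssertionError (excluded by Pre_)
def pvLoopA (toks : List String) : Option (List String × List String) :=
  toks.foldl (fun acc al =>
    match acc with
    | none => none
    | some (source, target) =>
      let al2 := pvSplitDash al
      if al2.length = 2 then
        some (source ++ [PySem.List.pyGetD al2 0 ""], target ++ [PySem.List.pyGetD al2 1 ""])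
      else none) (some ([], []))

def single_occurance_check (alignment : String) : Bool :=
  match pvLoopA (PySem.Str.split₀ alignment) with
  | none => false   -- Python raises AssertionError here; outside Pre_
  | some (source, target) =>
    if source.length ≠ (PySem.Set.ofList source).length then false
    else if target.length ≠ (PySem.Set.ofList target).length then false
    else true

-- ===== PORT B =====
-- any(a == b for a, b in zip(l, l[1:]))
def pvHasAdjDup (l : List String) : Bool :=
  (l.zip (PySem.List.slice l (some 1) none)).any (fun p => p.1 == p.2)

def single_occurance_check_alt (alignment : String) : Bool :=
  let pairs := (PySem.Str.split₀ alignment).map (fun al => pvSplitDash al)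
  if pairs.all (fun p => p.length == 2) then
    let source := PySem.List.sorted (pairs.map (fun p => PySem.List.pyGetD p 0 "")) (fun x => x) false
    if pvHasAdjDup source then false
    else
      let target := PySem.List.sorted (pairs.map (fun p => PySem.List.pyGetD p 1 "")) (fun x => x) false
      !pvHasAdjDup target
  else false  -- Python raises AssertionError here; outside Pre_

-- ===== PRECONDITION & SPEC =====
-- excludes exactly the inputs where the assert fails (AssertionError in both A and B)
def Pre_single_occurance_check (alignment : String) : Prop :=
  ∀ al ∈ PySem.Str.split₀ alignment, (pvSplitDash al).length = 2
instance (alignment : String) : Decidable (Pre_single_occurance_check alignment) := by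
  unfold Pre_single_occurance_check; infer_instance
def pvWitness_single_occurance_check : String := "0-1 1-2"

def Spec_single_occurance_check (alignment : String) (out : Bool) : Prop := out = single_occurance_check_alt alignment
instance (alignment : String) (out : Bool) : Decidable (Spec_single_occurance_check alignment out) := by unfold Spec_single_occurance_check; infer_instance

-- ===== CLAIM (what is proved, stated in full; the proofs are below) =====
def Claim_equal_single_occurance_check : Prop := ∀ (alignment : String), Dom_single_occurance_check alignment → Pre_single_occurance_check alignment → Spec_single_occurance_check alignment (single_occurance_check alignment)

-- ===== LEMMAS AND PROOFS =====

-- the fold of A, characterised on well-formed token lists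
theorem pvLoopA_eq (toks : List String)
    (h : ∀ al ∈ toks, (pvSplitDash al).length = 2) :
    ∀ s t, toks.foldl (fun acc al =>
      match acc with
      | none => none
      | some (source, target) =>
        let al2 := pvSplitDash al
        if al2.length = 2 then
          some (source ++ [PySem.List.pyGetD al2 0 ""], target ++ [PySem.List.pyGetD al2 1 ""])
        else none) (some (s, t)) =
      some (s ++ toks.map (fun al => PySem.List.pyGetD (pvSplitDash al) 0 ""),
            t ++ toks.map (fun al => PySem.List.pyGetD (pvSplitDash al) 1 "")) := by
  induction toks with
  | nil => simp
  | cons a l ih =>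
    intro s t
    have ha := h a (by simp)
    simp only [List.foldl_cons, List.map_cons]
    rw [if_pos ha]
    rw [ih (fun al hal => h al (by simp [hal])) _ _]
    simp

-- the add-fold behind PySem.Set.ofList produces a sublist of its argument
theorem pvOfList_sublist {α : Type} [BEq α] [LawfulBEq α] (l : List α) :
    ∀ s : PySem.Set α, ∃ t, t.Sublist l ∧ l.foldl PySem.Set.add s = s ++ t := by
  induction l with
  | nil => intro s; exact ⟨[], by simp⟩
  | cons a l ih =>
    intro s
    by_cases hm : a ∈ s
    · obtain ⟨t, hsub, heq⟩ := ih s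
      refine ⟨t, hsub.cons a, ?_⟩
      simpa [PySem.Set.add, hm] using heq
    · obtain ⟨t, hsub, heq⟩ := ih (s ++ [a])
      refine ⟨a :: t, hsub.cons₂ a, ?_⟩
      simp only [List.foldl_cons]
      have hadd : PySem.Set.add s a = s ++ [a] := by simp [PySem.Set.add, hm]
      rw [hadd, heq]; simp

-- len(l) = len(set(l)) ↔ l has no duplicates
theorem pvLenSet_iff (l : List String) :
    l.length = (PySem.Set.ofList l).length ↔ l.Nodup := by
  constructor
  · intro hl
    obtain ⟨t, hsub, heq⟩ := pvOfList_sublist l ([] : PySem.Set String)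
    have hof : PySem.Set.ofList l = t := by
      rw [PySem.Set.ofList_eq_foldl]; simpa using heq
    have hlen : t.length = l.length := by rw [← hof]; exact hl.symm
    have htl : t = l := hsub.eq_of_length hlen
    exact htl ▸ hof ▸ PySem.Set.nodup_ofList l
  · intro h
    rw [PySem.Set.ofList_eq_self_of_nodup l h]

-- the adjacent scan on a ≤-sorted list detects exactly the presence of duplicates
theorem pvAdjTail (l : List String) (hp : l.Pairwise (· ≤ ·)) :
    ((l.zip (l.drop 1)).any fun p => p.1 == p.2) = false ↔ l.Nodup := by
  induction l with
  | nil => simp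
  | cons a l ih =>
    cases l with
    | nil => simp
    | cons b t =>
      obtain ⟨hab, hpl⟩ := List.pairwise_cons.mp hp
      have ihbt := ih hpl
      simp only [List.drop_one, List.tail_cons, List.zip_cons_cons, List.any_cons,
        Bool.or_eq_false_iff, beq_eq_false_iff_ne, List.nodup_cons] at *
      constructor
      · rintro ⟨h1, h2⟩
        refine ⟨?_, ihbt.mp h2⟩
        intro hmem
        rcases List.mem_cons.mp hmem with h | h
        · exact h1 h
        · exact h1 (le_antisymm (hab b (by simp)) ((List.pairwise_cons.mp hpl).1 a h))
      · rintro ⟨hnm, hnd⟩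
        exact ⟨fun h => hnm (by simp [h]), ihbt.mpr hnd⟩

theorem pvAdj_iff (l : List String) (hp : l.Pairwise (· ≤ ·)) :
    pvHasAdjDup l = false ↔ l.Nodup := by
  unfold pvHasAdjDup
  rw [PySem.List.slice_from l (by norm_num : (0:Int) ≤ 1)]
  exact pvAdjTail l hp

-- ===== VERDICT (by name: the statement is the Claim_ definition above) =====
theorem single_occurance_check_spec : Claim_equal_single_occurance_check := by
  intro alignment _ hpre
  unfold Spec_single_occurance_check single_occurance_check single_occurance_check_alt
  set toks := PySem.Str.split₀ alignment with htoks
  have hall : (toks.map (fun al => pvSplitDash al)).all (fun p => p.length == 2) = true := by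
    simp only [List.all_map, List.all_eq_true]
    intro al hal
    simpa using hpre al hal
  have hloop := pvLoopA_eq toks hpre [] []
  unfold pvLoopA
  rw [hloop]
  simp only [List.nil_append, hall, if_true]
  set src := toks.map (fun al => PySem.List.pyGetD (pvSplitDash al) 0 "") with hsrc
  set tgt := toks.map (fun al => PySem.List.pyGetD (pvSplitDash al) 1 "") with htgt
  have hsrc2 : (toks.map fun al => pvSplitDash al).map (fun p => PySem.List.pyGetD p 0 "") = src := by
    rw [List.map_map]; rfl
  have htgt2 : (toks.map fun al => pvSplitDash al).map (fun p => PySem.List.pyGetD p 1 "") = tgt := by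
    rw [List.map_map]; rfl
  rw [hsrc2, htgt2]
  have hs := pvAdj_iff (PySem.List.sorted src (fun x => x) false)
    (by simpa using PySem.List.sorted_pairwise src (fun x => x))
  have ht := pvAdj_iff (PySem.List.sorted tgt (fun x => x) false)
    (by simpa using PySem.List.sorted_pairwise tgt (fun x => x))
  have hsperm := (PySem.List.sorted_perm src (fun x => x) false).nodup_iff
  have htperm := (PySem.List.sorted_perm tgt (fun x => x) false).nodup_iff
  by_cases hnds : src.Nodup
  · have h1 : ¬ src.length ≠ (PySem.Set.ofList src).length := by
      simp [(pvLenSet_iff src).mpr hnds]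
    have hadj : pvHasAdjDup (PySem.List.sorted src (fun x => x) false) = false :=
      hs.mpr (hsperm.mpr hnds)
    rw [if_neg h1, hadj]
    by_cases hndt : tgt.Nodup
    · have h2 : ¬ tgt.length ≠ (PySem.Set.ofList tgt).length := by
        simp [(pvLenSet_iff tgt).mpr hndt]
      have hadjt : pvHasAdjDup (PySem.List.sorted tgt (fun x => x) false) = false :=
        ht.mpr (htperm.mpr hndt)
      rw [if_neg h2]
      simp [hadjt]
    · have h2 : tgt.length ≠ (PySem.Set.ofList tgt).length := fun h => hndt ((pvLenSet_iff tgt).mp h)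
      have hadjt : pvHasAdjDup (PySem.List.sorted tgt (fun x => x) false) = true := by
        by_contra hf
        exact hndt (htperm.mp (ht.mp (by simpa using hf)))
      rw [if_pos h2]
      simp [hadjt]
  · have h1 : src.length ≠ (PySem.Set.ofList src).length := fun h => hnds ((pvLenSet_iff src).mp h)
    have hadj : pvHasAdjDup (PySem.List.sorted src (fun x => x) false) = true := by
      by_contra hf
      exact hnds (hsperm.mp (hs.mp (by simpa using hf)))
    rw [if_pos h1]
    simp [hadj]
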